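-- pv_equiv track=rewrite | github.com/glemvik/Knowit_julekalender2017 | Luke15.py | find_cuts
-- ===== SOURCE A (Python) =====
-- def find_cuts(trees):
--     """
--     Returns the number a list of the number of trees that are cut at each
--     iteration, when all trees are cut by the height of the smallest tree.
--     """
--
--     # Sort for easy finding smallest tree
--     trees = sorted(trees)
--
--     # Perform cuts until all trees have zero height
--     number_of_cuts = []
--     while len(trees) > 0:
--
--         # Get smallest tree. All trees in list will be cut at this iteration
--         cut = trees[0]
--         number_of_cuts.append(len(trees))
--
--         # Update list of trees
--         trees = [(tree - cut) for tree in trees if (tree - cut) > 0]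
--
--     return number_of_cuts
-- ===== SOURCE B (Python) =====
-- def find_cuts(trees):
--     """
--     Returns the number a list of the number of trees that are cut at each
--     iteration, when all trees are cut by the height of the smallest tree.
--
--     Single pass over the sorted list: a cut happens at every new distinct
--     height, and cuts down exactly the trees not yet passed.
--     """
--     s = sorted(trees)
--     out = []
--     remaining = len(s)
--     prev = None
--     for v in s:
--         if v != prev:
--             out.append(remaining)
--         prev = v
--         remaining -= 1
--     return out
-- ===== Notes on version B (the rewrite author's own statement) =====
-- stated objective: faster
-- what changed: Instead of repeatedly rebuilding the tree list (subtract the minimum, filter, loop), B sorts once and makes one pass over the sorted list, emitting the number of remaining trees at every new distinct height.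
import Mathlib
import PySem

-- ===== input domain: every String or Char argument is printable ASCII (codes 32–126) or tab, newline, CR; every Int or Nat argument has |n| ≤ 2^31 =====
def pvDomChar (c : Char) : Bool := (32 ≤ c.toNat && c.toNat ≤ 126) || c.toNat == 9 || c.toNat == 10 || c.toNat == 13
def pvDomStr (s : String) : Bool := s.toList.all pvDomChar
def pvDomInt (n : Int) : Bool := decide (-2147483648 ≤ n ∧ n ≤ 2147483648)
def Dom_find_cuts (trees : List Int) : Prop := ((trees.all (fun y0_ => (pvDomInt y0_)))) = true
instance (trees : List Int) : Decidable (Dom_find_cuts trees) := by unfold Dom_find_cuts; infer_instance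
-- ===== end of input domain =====

-- B replaces A's repeated subtract-and-filter rebuilds by one pass over the sorted list (objective: faster).

-- ===== PORT A =====
-- A's while loop: cut = trees[0], record len(trees), rebuild trees; terminates because the
-- head c always fails the filter (c - c > 0 is false), so the list strictly shrinks.
def findCutsLoop (trees : List Int) : List Int :=
  match trees with
  | [] => []
  | c :: rest =>
      (((c :: rest).length : Int)) ::
        findCutsLoop (((c :: rest).filter (fun t => decide (t - c > 0))).map (fun t => t - c))
termination_by trees.length
decreasing_by
  simp only [List.length_map, List.filter_cons]
  have h : ¬ (c - c > 0) := by omega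
  simp only [h, decide_false, List.length_cons]
  exact Nat.lt_succ_of_le (List.length_filter_le _ _)

def find_cuts (trees : List Int) : List Int :=
  findCutsLoop (PySem.List.sorted trees (fun x => x) false)

-- ===== PORT B =====
-- Source B: s = sorted(trees); one pass with (out, prev, remaining); append remaining at each new value.
def find_cuts_alt (trees : List Int) : List Int :=
  let s := PySem.List.sorted trees (fun x => x) false
  (s.foldl
    (fun (st : List Int × Option Int × Int) v =>
      ((if some v ≠ st.2.1 then st.1 ++ [st.2.2] else st.1), some v, st.2.2 - 1))
    ([], none, (s.length : Int))).1

-- ===== PRECONDITION & SPEC =====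
def Spec_find_cuts (trees : List Int) (out : List Int) : Prop := out = find_cuts_alt trees
instance (trees : List Int) (out : List Int) : Decidable (Spec_find_cuts trees out) := by unfold Spec_find_cuts; infer_instance

-- ===== CLAIM (what is proved, stated in full; the proofs are below) =====
def Claim_equal_find_cuts : Prop := ∀ (trees : List Int), Dom_find_cuts trees → Spec_find_cuts trees (find_cuts trees)

-- ===== LEMMAS AND PROOFS =====

-- The emitted list of B's fold, accumulator factored out.
def pvAux : List Int → Option Int → Int → List Int
  | [], _, _ => []
  | v :: t, p, r => (if some v ≠ p then [r] else []) ++ pvAux t (some v) (r - 1)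

theorem pvFoldl_eq_aux (l : List Int) (out : List Int) (p : Option Int) (r : Int) :
    (l.foldl
      (fun (st : List Int × Option Int × Int) v =>
        ((if some v ≠ st.2.1 then st.1 ++ [st.2.2] else st.1), some v, st.2.2 - 1))
      (out, p, r)).1 = out ++ pvAux l p r := by
  induction l generalizing out p r with
  | nil => simp [pvAux]
  | cons v t ih =>
      simp only [List.foldl_cons, pvAux, ih]
      split_ifs <;> simp

-- Core: on a tail whose elements are all ≥ c and sorted, B's pass with prev = c
-- computes exactly A's loop on the rebuilt list.
theorem pvAux_eq_loop (rest : List Int) : ∀ (c : Int),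
    rest.Pairwise (fun a b => a ≤ b) → (∀ x ∈ rest, c ≤ x) →
    pvAux rest (some c) (rest.length : Int) =
      findCutsLoop ((rest.filter (fun t => decide (t - c > 0))).map (fun t => t - c)) := by
  induction rest with
  | nil => intro c _ _; simp [pvAux, findCutsLoop]
  | cons v t ih =>
      intro c hsort hge
      have hvt : ∀ x ∈ t, v ≤ x := fun x hx => (List.pairwise_cons.mp hsort).1 x hx
      have hts : t.Pairwise (fun a b => a ≤ b) := (List.pairwise_cons.mp hsort).2
      have hcv : c ≤ v := hge v (by simp)
      by_cases hvc : v = c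
      · -- v equals prev: no emission, and the filter drops v too
        subst hvc
        have hflt : (decide (v - v > 0)) = false := by simp
        simp only [pvAux, List.filter_cons, hflt, Bool.false_eq_true, if_false,
          if_neg (show ¬(some v ≠ some v) from fun h => h rfl), List.nil_append,
          List.length_cons]
        push_cast
        rw [add_sub_cancel_right]
        exact ih v hts hvt
      · -- new value v > c: everything in v :: t survives the filter
        have hcv' : c < v := lt_of_le_of_ne hcv (fun h => hvc h.symm)
        have hfilter : (v :: t).filter (fun t' => decide (t' - c > 0)) = v :: t := by
          apply List.filter_eq_self.mpr
          intro x hx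
          rcases List.mem_cons.mp hx with h | h
          · subst h; simp; omega
          · have := hvt x h; simp; omega
        rw [hfilter]
        -- unfold one step of A's loop on (v-c) :: map (· - c) t
        rw [List.map_cons, findCutsLoop]
        have hhead : (decide ((v - c) - (v - c) > 0)) = false := by simp
        have hflt2 :
            ((t.map (fun x => x - c)).filter (fun x => decide (x - (v - c) > 0))).map
              (fun x => x - (v - c)) =
            (t.filter (fun x => decide (x - v > 0))).map (fun x => x - v) := by
          rw [List.filter_map, List.map_map]
          have hp : ((fun x => decide (x - (v - c) > 0)) ∘ (fun x => x - c))
              = (fun x : Int => decide (x - v > 0)) := by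
            funext x; simp only [Function.comp]
            apply decide_eq_decide.mpr
            omega
          have hq : ((fun x => x - (v - c)) ∘ (fun x => x - c)) = (fun x : Int => x - v) := by
            funext x; simp only [Function.comp]; omega
          rw [hp, hq]
        simp only [pvAux, List.filter_cons, hhead, Bool.false_eq_true, if_false,
          if_pos (show some v ≠ some c from fun h => hvc (Option.some.inj h)),
          List.singleton_append, List.length_cons, List.length_map, hflt2]
        push_cast
        rw [add_sub_cancel_right]
        exact congrArg _ (ih v hts hvt)

-- On any sorted list the two programs' cores agree.
theorem pv_main (s : List Int) (hs : s.Pairwise (fun a b => a ≤ b)) :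
    findCutsLoop s =
      (s.foldl
        (fun (st : List Int × Option Int × Int) v =>
          ((if some v ≠ st.2.1 then st.1 ++ [st.2.2] else st.1), some v, st.2.2 - 1))
        ([], none, (s.length : Int))).1 := by
  rw [pvFoldl_eq_aux, List.nil_append]
  cases s with
  | nil => simp [pvAux, findCutsLoop]
  | cons c rest =>
      have hge : ∀ x ∈ rest, c ≤ x := fun x hx => (List.pairwise_cons.mp hs).1 x hx
      have hrs : rest.Pairwise (fun a b => a ≤ b) := (List.pairwise_cons.mp hs).2
      rw [findCutsLoop]
      have hfc : (decide (c - c > 0)) = false := by simp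
      simp only [pvAux, List.filter_cons, hfc, Bool.false_eq_true, if_false,
        if_pos (show some c ≠ none from Option.some_ne_none c),
        List.singleton_append, List.length_cons]
      push_cast
      rw [add_sub_cancel_right]
      exact congrArg _ (pvAux_eq_loop rest c hrs hge).symm

-- ===== VERDICT (by name: the statement is the Claim_ definition above) =====
theorem find_cuts_spec : Claim_equal_find_cuts := by
  intro trees _
  unfold Spec_find_cuts find_cuts find_cuts_alt
  exact pv_main _ (PySem.List.sorted_pairwise trees (fun x => x) )
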